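-- pv_equiv track=rewrite | github.com/AlperKaraaslan/mail-zoner | mail_zoner/util/util.py | get_id_startend_mappings
-- ===== SOURCE A (Python) =====
-- def get_id_startend_mappings(ids):
--     id_positions={}
--     N = len(ids)
--
--     reversed_list = ids[::-1]
--     for key in set(ids):
--         start = ids.index(key)
--         end = N - reversed_list.index(key)
--
--         id_positions[key] = (start,end)
--     return id_positions
-- ===== SOURCE B (Python) =====
-- def get_id_startend_mappings(ids):
--     # One pass: record first index on first sight, bump end to i+1 on every sight.
--     id_positions = {}
--     for i, x in enumerate(ids):
--         cur = id_positions.get(x, (i, 0))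
--         id_positions[x] = (cur[0], i + 1)
--     return id_positions
-- ===== Notes on version B (the rewrite author's own statement) =====
-- stated objective: faster
-- what changed: Replaced the per-key list scans (set + ids.index + reversed.index for every distinct id) with a single enumerate pass over ids that records the first index on first sight and bumps the end to i+1 on each occurrence.
import Mathlib
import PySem

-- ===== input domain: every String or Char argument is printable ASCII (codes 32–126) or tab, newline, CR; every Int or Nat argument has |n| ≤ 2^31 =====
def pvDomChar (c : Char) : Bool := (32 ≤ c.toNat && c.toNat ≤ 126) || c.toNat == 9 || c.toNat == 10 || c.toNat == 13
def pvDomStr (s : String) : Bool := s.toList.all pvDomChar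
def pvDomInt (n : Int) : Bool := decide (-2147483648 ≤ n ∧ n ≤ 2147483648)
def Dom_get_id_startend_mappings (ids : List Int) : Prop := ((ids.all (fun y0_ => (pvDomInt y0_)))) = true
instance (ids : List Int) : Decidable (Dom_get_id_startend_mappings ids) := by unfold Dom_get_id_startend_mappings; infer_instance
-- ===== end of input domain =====

-- B replaces A's per-distinct-key scans with one enumerate pass (objective: faster).
-- Both Pythons return a dict id -> (start, end); the tuple is ported as the list [start, end].
-- A iterates over set(ids) (hash order); dict outputs are compared ignoring order, the ports use first-occurrence order.

-- ===== PORT A =====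
def get_id_startend_mappings (ids : List Int) : List (Int × List Int) :=
  let N : Int := ids.length
  -- reversed_list = ids[::-1]  (never raises, so getD is never taken)
  let reversed_list : List Int := (PySem.List.slice? ids none none (-1)).getD []
  -- for key in set(ids): id_positions[key] = (ids.index(key), N - reversed_list.index(key))
  -- key is always in ids, so .index never raises and the getD 0 is never taken
  ((PySem.Set.ofList ids).foldl
    (fun (d : PySem.Dict Int (List Int)) key =>
      let start : Int := ((PySem.List.index? ids key).getD 0 : Nat)
      let e : Int := N - ((PySem.List.index? reversed_list key).getD 0 : Nat)
      d.insert key [start, e])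
    PySem.Dict.empty).items

-- ===== PORT B =====
def get_id_startend_mappings_alt (ids : List Int) : List (Int × List Int) :=
  -- for i, x in enumerate(ids): cur = id_positions.get(x, (i, 0)); id_positions[x] = (cur[0], i + 1)
  -- cur[0]: cur is always the two-element pair, ported as List.getD cur 0 0
  ((PySem.List.enumerate ids 0).foldl
    (fun (d : PySem.Dict Int (List Int)) p =>
      let cur := d.getD p.2 [p.1, 0]
      d.insert p.2 [cur.getD 0 0, p.1 + 1])
    PySem.Dict.empty).items

-- ===== PRECONDITION & SPEC =====
def Spec_get_id_startend_mappings (ids : List Int) (out : List (Int × List Int)) : Prop := out = get_id_startend_mappings_alt ids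
instance (ids : List Int) (out : List (Int × List Int)) : Decidable (Spec_get_id_startend_mappings ids out) := by unfold Spec_get_id_startend_mappings; infer_instance

-- ===== CLAIM (what is proved, stated in full; the proofs are below) =====
def Claim_equal_get_id_startend_mappings : Prop := ∀ (ids : List Int), Dom_get_id_startend_mappings ids → Spec_get_id_startend_mappings ids (get_id_startend_mappings ids)

-- ===== LEMMAS AND PROOFS =====

-- the per-key value both sides end up with, over the whole list `pre`
def pvVal (pre : List Int) (k : Int) : List Int :=
  [(((PySem.List.index? pre k).getD 0 : Nat) : Int),
   (pre.length : Int) - (((PySem.List.index? pre.reverse k).getD 0 : Nat) : Int)]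

theorem pvVal_append_of_ne (pre : List Int) (x k : Int) (hk : k ∈ pre) (hne : k ≠ x) :
    pvVal (pre ++ [x]) k = pvVal pre k := by
  unfold pvVal
  rw [PySem.List.index?_append_of_mem _ hk, List.reverse_append]
  simp only [List.reverse_cons, List.reverse_nil, List.nil_append, List.singleton_append]
  rw [PySem.List.index?_cons_of_ne _ (Ne.symm hne)]
  have hmem : k ∈ pre.reverse := by simpa using hk
  obtain ⟨n, hn⟩ := Option.isSome_iff_exists.mp ((PySem.List.index?_isSome_iff _ _).mpr hmem)
  simp only [hn, Option.map_some, Option.getD_some, List.length_append, List.length_cons,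
    List.length_nil]
  simp only [List.cons.injEq, and_true, true_and]
  push_cast; omega

theorem pvVal_append_self_mem (pre : List Int) (x : Int) (hk : x ∈ pre) :
    pvVal (pre ++ [x]) x = [(((PySem.List.index? pre x).getD 0 : Nat) : Int), (pre.length : Int) + 1] := by
  unfold pvVal
  rw [PySem.List.index?_append_of_mem _ hk, List.reverse_append]
  simp only [List.reverse_cons, List.reverse_nil, List.nil_append, List.singleton_append]
  rw [PySem.List.index?_cons_self]
  simp

theorem pvVal_append_self_new (pre : List Int) (x : Int) (hk : x ∉ pre) :
    pvVal (pre ++ [x]) x = [(pre.length : Int), (pre.length : Int) + 1] := by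
  unfold pvVal
  rw [PySem.List.index?_append_singleton_self _ x hk, List.reverse_append]
  simp only [List.reverse_cons, List.reverse_nil, List.nil_append, List.singleton_append]
  rw [PySem.List.index?_cons_self]
  simp

-- B's one-pass loop computes exactly the first index and last index + 1 of every distinct id,
-- keyed in first-occurrence order
theorem pv_b_invariant (pre : List Int) :
    get_id_startend_mappings_alt pre = (PySem.List.dedup pre).map (fun k => (k, pvVal pre k)) := by
  unfold get_id_startend_mappings_alt
  induction pre using List.reverseRecOn with
  | nil => simp [PySem.List.enumerate, PySem.List.dedup, PySem.Dict.empty]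
  | append_singleton pre x ih =>
    rw [PySem.List.enumerate_append, List.foldl_append]
    simp only [PySem.List.enumerate_cons, PySem.List.enumerate_nil, List.foldl_cons, List.foldl_nil]
    set D := ((PySem.List.enumerate pre 0).foldl
      (fun (d : PySem.Dict Int (List Int)) p =>
        let cur := d.getD p.2 [p.1, 0]
        d.insert p.2 [cur.getD 0 0, p.1 + 1])
      PySem.Dict.empty) with hDdef
    have hkeys : D.keys = PySem.List.dedup pre := by
      show D.items.map Prod.fst = _
      rw [ih, List.map_map,
        show (Prod.fst ∘ fun k : Int => ((k, pvVal pre k) : Int × List Int)) = id from rfl,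
        List.map_id]
    have hnodup : D.keys.Nodup := by rw [hkeys]; exact PySem.List.nodup_dedup pre
    have hded : PySem.List.dedup (pre ++ [x])
        = if x ∈ pre then PySem.List.dedup pre else PySem.List.dedup pre ++ [x] := by
      simp only [PySem.List.dedup_eq_ofList, PySem.Set.ofList_eq_foldl, List.foldl_append,
        List.foldl_cons, List.foldl_nil]
      rw [← PySem.Set.ofList_eq_foldl]
      by_cases h : x ∈ pre <;> simp [PySem.Set.add, PySem.Set.mem_ofList, h]
    by_cases hx : x ∈ pre
    · -- existing key: getD returns pvVal pre x, insert overwrites in place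
      have hmemitems : (x, pvVal pre x) ∈ D.items := by
        rw [ih]; exact List.mem_map.mpr ⟨x, (PySem.List.mem_dedup _ _).mpr hx, rfl⟩
      have hget : D.getD x [(0 : Int) + (pre.length : Int), 0] = pvVal pre x :=
        PySem.Dict.getD_of_mem_items D hmemitems hnodup _
      have hcont : D.contains x = true := by
        rw [PySem.Dict.contains_iff_mem_keys, hkeys]
        exact (PySem.List.mem_dedup _ _).mpr hx
      show (D.insert x _).items = _
      rw [hget]
      rw [PySem.Dict.items_insert_of_contains D _ hcont, ih, List.map_map, hded, if_pos hx]
      refine List.map_congr_left (fun k hk => ?_)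
      have hkpre : k ∈ pre := (PySem.List.mem_dedup _ _).mp hk
      by_cases hkx : k = x
      · subst hkx
        simp only [Function.comp_apply, beq_self_eq_true, if_pos]
        rw [pvVal_append_self_mem pre k hx]
        unfold pvVal
        simp
      · simp only [Function.comp_apply]
        rw [if_neg (by simpa using hkx)]
        rw [pvVal_append_of_ne pre x k hkpre hkx]
    · -- new key: getD returns the default, insert appends
      have hcont : D.contains x = false := by
        have : x ∉ D.keys := by rw [hkeys]; simpa [PySem.List.mem_dedup] using hx
        cases h : D.contains x
        · rfl
        · exact absurd ((PySem.Dict.contains_iff_mem_keys D x).mp h) this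
      have hget : D.getD x [(0 : Int) + (pre.length : Int), 0] = [(0 : Int) + (pre.length : Int), 0] :=
        PySem.Dict.getD_of_not_contains D _ hcont
      show (D.insert x _).items = _
      rw [hget]
      rw [PySem.Dict.items_insert_of_not_contains D _ hcont, ih, hded, if_neg hx, List.map_append]
      congr 1
      · refine List.map_congr_left (fun k hk => ?_)
        have hkpre : k ∈ pre := (PySem.List.mem_dedup _ _).mp hk
        rw [pvVal_append_of_ne pre x k hkpre (by rintro rfl; exact hx hkpre)]
      · rw [List.map_singleton, pvVal_append_self_new pre x hx]
        simp

-- ===== VERDICT (by name: the statement is the Claim_ definition above) =====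
theorem get_id_startend_mappings_spec : Claim_equal_get_id_startend_mappings := by
  intro ids _
  unfold Spec_get_id_startend_mappings
  rw [pv_b_invariant, PySem.List.dedup_eq_ofList]
  show ((PySem.Set.ofList ids).foldl
      (fun (d : PySem.Dict Int (List Int)) key =>
        d.insert key [(((PySem.List.index? ids key).getD 0 : Nat) : Int),
          ((ids.length : Int)) - ((PySem.List.index? ((PySem.List.slice? ids none none (-1)).getD []) key).getD 0 : Nat)])
      PySem.Dict.empty).items = _
  rw [PySem.List.slice?_none_none_neg_one]
  rw [PySem.Dict.items_foldl_insert_fresh (PySem.Set.ofList ids) (fun key => key)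
      (fun key => [(((PySem.List.index? ids key).getD 0 : Nat) : Int),
        ((ids.length : Int)) - ((PySem.List.index? ((some ids.reverse).getD []) key).getD 0 : Nat)])
      PySem.Dict.empty (fun a _ => PySem.Dict.contains_empty a)
      (by rw [List.map_id']; exact PySem.Set.nodup_ofList ids)]
  simp [pvVal, PySem.Dict.empty]
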